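-- pv_equiv track=rewrite | github.com/maxspencer/pdfrefiner | pdfparse.py | round_to_column
-- ===== SOURCE A (Python) =====
-- def round_to_column(x, cols):
--     scols = sorted(cols)
--
--     # i is the column index we are going to return. The loop increments it if
--     # the given x coord is greater than the next column coord.
--     i = 0
--     while i < len(scols) - 1:
--         if x >= scols[i+1]:
--             i += 1
--         else:
--             break;
--     return i
-- ===== SOURCE B (Python) =====
-- def round_to_column(x, cols):
--     # Count columns <= x in one pass; no sort needed.
--     return max(sum(1 for c in cols if c <= x) - 1, 0)
-- ===== Notes on version B (the rewrite author's own statement) =====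
-- stated objective: faster
-- what changed: Replaces sort + linear index-walk by a single unsorted pass counting columns <= x, returning max(count-1, 0).
import Mathlib
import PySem

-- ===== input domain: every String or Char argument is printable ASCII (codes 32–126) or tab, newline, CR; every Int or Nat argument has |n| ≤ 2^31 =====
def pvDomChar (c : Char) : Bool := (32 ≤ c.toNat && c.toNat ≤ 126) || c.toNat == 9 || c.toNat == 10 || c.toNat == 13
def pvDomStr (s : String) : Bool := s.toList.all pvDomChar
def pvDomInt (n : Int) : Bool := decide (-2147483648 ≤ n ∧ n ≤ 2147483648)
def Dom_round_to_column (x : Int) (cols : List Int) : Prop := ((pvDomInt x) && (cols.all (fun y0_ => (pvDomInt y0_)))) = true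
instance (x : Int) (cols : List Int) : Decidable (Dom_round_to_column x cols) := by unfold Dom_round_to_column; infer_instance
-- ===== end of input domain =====

-- B replaces A's sort + index-walk by one unsorted counting pass: max(#{c in cols | c <= x} - 1, 0).


-- ===== PORT A =====
-- the while loop of A: i advances while i < len(scols)-1 and x >= scols[i+1]
def rtcLoop (x : Int) (scols : List Int) (i : Nat) : Nat :=
  if h : i + 1 < scols.length then
    if x ≥ scols[i+1] then rtcLoop x scols (i+1) else i
  else i
termination_by scols.length - i

def round_to_column (x : Int) (cols : List Int) : Int :=
  let scols := PySem.List.sorted cols (fun c => c) false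
  (rtcLoop x scols 0 : Int)

-- ===== PORT B =====
def round_to_column_alt (x : Int) (cols : List Int) : Int :=
  max ((cols.foldl (fun acc c => if c ≤ x then acc + 1 else acc) 0) - 1) 0

-- ===== PRECONDITION & SPEC =====
def Spec_round_to_column (x : Int) (cols : List Int) (out : Int) : Prop := out = round_to_column_alt x cols
instance (x : Int) (cols : List Int) (out : Int) : Decidable (Spec_round_to_column x cols out) := by unfold Spec_round_to_column; infer_instance

-- ===== CLAIM (what is proved, stated in full; the proofs are below) =====
def Claim_equal_round_to_column : Prop := ∀ (x : Int) (cols : List Int), Dom_round_to_column x cols → Spec_round_to_column x cols (round_to_column x cols)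

-- ===== LEMMAS AND PROOFS =====

-- B's foldl counter equals countP
theorem rtc_foldl_countP (x : Int) (cols : List Int) (acc : Int) :
    cols.foldl (fun acc c => if c ≤ x then acc + 1 else acc) acc
      = acc + (cols.countP (fun c => decide (c ≤ x)) : Int) := by
  induction cols generalizing acc with
  | nil => simp
  | cons c t ih =>
    simp only [List.foldl_cons, List.countP_cons, ih]
    by_cases h : c ≤ x <;> simp [h] <;> try ring

-- in a sorted list, if element j is ≤ x then at least j+1 elements are ≤ x
theorem rtc_count_ge (x : Int) (l : List Int) (hs : l.Pairwise (· ≤ ·))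
    (j : Nat) (hj : j < l.length) (hx : l[j] ≤ x) :
    j + 1 ≤ l.countP (fun c => decide (c ≤ x)) := by
  have := l.take_append_drop (j+1)
  have hlen : (l.take (j+1)).length = j + 1 := by
    simp [Nat.min_eq_left (by omega : j + 1 ≤ l.length)]
  have hall : ∀ c ∈ l.take (j+1), (fun c => decide (c ≤ x)) c = true := by
    intro c hc
    obtain ⟨m, hm, rfl⟩ := List.mem_iff_getElem.mp hc
    have hm' : m < j + 1 := by omega
    have hg : (l.take (j+1))[m] = l[m]'(by rw [hlen] at hm; omega) := List.getElem_take
    rw [hg]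
    rcases Nat.lt_or_ge m j with hlt | hge
    · have := (List.pairwise_iff_getElem.mp hs) m j (by omega) hj hlt
      simp; omega
    · have : m = j := by omega
      subst this; simp; exact hx
  calc j + 1 = (l.take (j+1)).countP (fun c => decide (c ≤ x)) := by
        rw [List.countP_eq_length.mpr hall, hlen]
    _ ≤ l.countP (fun c => decide (c ≤ x)) := by
        conv_rhs => rw [← l.take_append_drop (j+1)]
        rw [List.countP_append]; omega

-- in a sorted list, if element j is > x then at most j elements are ≤ x
theorem rtc_count_le (x : Int) (l : List Int) (hs : l.Pairwise (· ≤ ·))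
    (j : Nat) (hj : j < l.length) (hx : x < l[j]) :
    l.countP (fun c => decide (c ≤ x)) ≤ j := by
  have hdrop : (l.drop j).countP (fun c => decide (c ≤ x)) = 0 := by
    rw [List.countP_eq_zero]
    intro c hc
    obtain ⟨m, hm, rfl⟩ := List.mem_iff_getElem.mp hc
    have hg : (l.drop j)[m] = l[j + m]'(by simp at hm; omega) := List.getElem_drop
    rw [hg]
    rcases Nat.eq_zero_or_pos m with rfl | hpos
    · simp; omega
    · have := (List.pairwise_iff_getElem.mp hs) j (j+m) hj (by simp at hm; omega) (by omega)
      simp; omega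
  conv_lhs => rw [← l.take_append_drop j]
  rw [List.countP_append, hdrop]
  have := List.countP_le_length (l := l.take j) (p := fun c => decide (c ≤ x))
  simp at this; omega

-- the loop on a sorted list computes max (count-1) i, given the entry invariant
theorem rtc_loop_char (x : Int) (l : List Int) (hs : l.Pairwise (· ≤ ·))
    (i : Nat) :
    rtcLoop x l i = max (l.countP (fun c => decide (c ≤ x)) - 1) i := by
  rw [rtcLoop]
  split
  · next h =>
    split
    · next hx =>
      have hrec := rtc_loop_char x l hs (i+1)
      rw [hrec]
      have hk := rtc_count_ge x l hs (i+1) h hx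
      omega
    · next hx =>
      have hk := rtc_count_le x l hs (i+1) h (by omega)
      omega
  · next h =>
    have hk := List.countP_le_length (l := l) (p := fun c => decide (c ≤ x))
    omega
termination_by l.length - i

-- ===== VERDICT (by name: the statement is the Claim_ definition above) =====
theorem round_to_column_spec : Claim_equal_round_to_column := by
  intro x cols _
  have hs := PySem.List.sorted_pairwise (xs := cols) (key := fun c : Int => c)
  have hperm := PySem.List.sorted_perm (xs := cols) (key := fun c : Int => c) (rev := false)
  have hloop := rtc_loop_char x (PySem.List.sorted cols (fun c => c) false) hs 0
  have hcnt := hperm.countP_eq (fun c => decide (c ≤ x))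
  show (↑(rtcLoop x (PySem.List.sorted cols (fun c => c) false) 0) : Int)
      = max ((cols.foldl (fun acc c => if c ≤ x then acc + 1 else acc) 0) - 1) 0
  rw [rtc_foldl_countP, hloop, hcnt]
  omega
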